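-- pv_equiv track=rewrite | github.com/coding-test-study-room/repo | programmers/dldbdud314/week17/체육복.py | solution
-- ===== SOURCE A (Python) =====
-- def solution(n, lost, reserve):
--     r_set = set(reserve) - set(lost)
--     l_set = set(lost) - set(reserve)
--
--     cnt = 0
--     for x in sorted(l_set):
--         if x - 1 in r_set:
--             r_set.remove(x - 1)
--         elif x + 1 in r_set:
--             r_set.remove(x + 1)
--         else:
--             cnt += 1  # 빌릴 수 없음
--
--     return n - cnt
-- ===== SOURCE B (Python) =====
-- def solution(n, lost, reserve):
--     # two-pointer merge over the two sorted, deduplicated lists (no mutable set)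
--     l = sorted(set(lost) - set(reserve))
--     r = sorted(set(reserve) - set(lost))
--     i = j = cnt = 0
--     while i < len(l):
--         x = l[i]
--         if j < len(r):
--             y = r[j]
--             if y == x - 1:
--                 i += 1; j += 1
--             elif y < x - 1:
--                 j += 1
--             elif y == x + 1:
--                 i += 1; j += 1
--             else:
--                 i += 1; cnt += 1
--         else:
--             i += 1; cnt += 1
--     return n - cnt
-- ===== Notes on version B (the rewrite author's own statement) =====
-- stated objective: alternative
-- what changed: Replaces A's mutable-set greedy (membership test and remove per lost student) with a two-pointer merge scan over the two sorted deduplicated lists, never mutating a set.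
import Mathlib
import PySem

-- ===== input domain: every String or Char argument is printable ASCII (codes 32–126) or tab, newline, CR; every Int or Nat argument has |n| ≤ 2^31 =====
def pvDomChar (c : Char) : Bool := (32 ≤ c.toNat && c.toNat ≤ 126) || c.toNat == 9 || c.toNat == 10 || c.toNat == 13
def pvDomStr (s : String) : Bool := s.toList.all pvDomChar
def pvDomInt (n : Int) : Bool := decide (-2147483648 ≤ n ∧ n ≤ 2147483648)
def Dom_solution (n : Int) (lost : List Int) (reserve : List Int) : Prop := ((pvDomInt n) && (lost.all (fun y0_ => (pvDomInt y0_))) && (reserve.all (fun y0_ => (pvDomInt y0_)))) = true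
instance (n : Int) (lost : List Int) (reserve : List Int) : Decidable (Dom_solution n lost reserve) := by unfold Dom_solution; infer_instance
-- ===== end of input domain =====

-- B replaces A's mutable-set greedy with a two-pointer merge over the two sorted deduplicated lists (alternative decomposition, same cost class).

-- ===== PORT A =====
-- one iteration of A's for-loop: state = (r_set, cnt); r_set.remove(v) is guarded by membership, so remove?.getD is exact
def borrowStep (st : PySem.Set Int × Int) (x : Int) : PySem.Set Int × Int :=
  if PySem.Set.contains st.1 (x - 1) then ((PySem.Set.remove? st.1 (x - 1)).getD st.1, st.2)
  else if PySem.Set.contains st.1 (x + 1) then ((PySem.Set.remove? st.1 (x + 1)).getD st.1, st.2)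
  else (st.1, st.2 + 1)

def solution (n : Int) (lost : List Int) (reserve : List Int) : Int :=
  let rset : PySem.Set Int := PySem.Set.diff (PySem.Set.ofList reserve) (PySem.Set.ofList lost)
  let lset : PySem.Set Int := PySem.Set.diff (PySem.Set.ofList lost) (PySem.Set.ofList reserve)
  let st := (PySem.List.sorted lset (fun x => x) false).foldl borrowStep (rset, 0)
  n - st.2

-- ===== PORT B =====
-- the two-pointer while-loop of Source B (the l-index and r-index become structural recursion on the two lists)
def twoPointer : List Int → List Int → Int → Int
  | [], _, cnt => cnt
  | _ :: ls, [], cnt => twoPointer ls [] (cnt + 1)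
  | x :: ls, y :: rs, cnt =>
    if y = x - 1 then twoPointer ls rs cnt
    else if y < x - 1 then twoPointer (x :: ls) rs cnt
    else if y = x + 1 then twoPointer ls rs cnt
    else twoPointer ls (y :: rs) (cnt + 1)
termination_by l r _ => l.length + r.length

def solution_alt (n : Int) (lost : List Int) (reserve : List Int) : Int :=
  let l := PySem.List.sorted (PySem.Set.diff (PySem.Set.ofList lost) (PySem.Set.ofList reserve)) (fun x => x) false
  let r := PySem.List.sorted (PySem.Set.diff (PySem.Set.ofList reserve) (PySem.Set.ofList lost)) (fun x => x) false
  n - twoPointer l r 0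

-- ===== PRECONDITION & SPEC =====
def Spec_solution (n : Int) (lost : List Int) (reserve : List Int) (out : Int) : Prop := out = solution_alt n lost reserve
instance (n : Int) (lost : List Int) (reserve : List Int) (out : Int) : Decidable (Spec_solution n lost reserve out) := by unfold Spec_solution; infer_instance

-- ===== CLAIM (what is proved, stated in full; the proofs are below) =====
def Claim_equal_solution : Prop := ∀ (n : Int) (lost : List Int) (reserve : List Int), Dom_solution n lost reserve → Spec_solution n lost reserve (solution n lost reserve)

-- ===== LEMMAS AND PROOFS =====

-- invariant: A's mutable set S = remaining sorted reserve list R ∪ discarded D, each d ∈ D below every future x - 1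
theorem main_inv : ∀ (L R S D : List Int) (cnt : Int),
    L.Pairwise (· < ·) → R.Pairwise (· < ·) → S.Nodup →
    (∀ v : Int, v ∈ S ↔ v ∈ R ∨ v ∈ D) →
    (∀ d ∈ D, ∀ x ∈ L, d < x - 1) →
    (∀ x ∈ L, x ∉ S) →
    (L.foldl borrowStep (S, cnt)).2 = twoPointer L R cnt := by
  intro L
  induction L with
  | nil =>
    intro R S D cnt _ _ _ _ _ _
    cases R <;> simp [twoPointer, List.foldl]
  | cons x ls ihL =>
    intro R S D cnt hL hR hS hmem hD hx
    have hxls : ∀ z ∈ ls, x < z := fun z hz => (List.pairwise_cons.1 hL).1 z hz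
    have hLtl : ls.Pairwise (· < ·) := (List.pairwise_cons.1 hL).2
    have hxS : x ∉ S := hx x (List.mem_cons_self ..)
    have hxtl : ∀ z ∈ ls, z ∉ S := fun z hz => hx z (List.mem_cons_of_mem _ hz)
    induction R generalizing S D cnt with
    | nil =>
      -- the set holds only discarded elements, all < x - 1: both neighbour checks fail
      have h1 : x - 1 ∉ S := by
        intro h; rcases (hmem _).1 h with h | h
        · simp at h
        · have := hD _ h x (List.mem_cons_self ..); omega
      have h2 : x + 1 ∉ S := by
        intro h; rcases (hmem _).1 h with h | h
        · simp at h
        · have := hD _ h x (List.mem_cons_self ..); omega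
      have hb : borrowStep (S, cnt) x = (S, cnt + 1) := by
        simp [borrowStep, h1, h2]
      rw [List.foldl_cons, hb, twoPointer]
      exact ihL [] S D (cnt + 1) hLtl (by simp) hS
        (by intro v; rw [hmem v]) (fun d hd z hz => hD d hd z (List.mem_cons_of_mem _ hz)) hxtl
    | cons y rs ihR =>
      have hyS : y ∈ S := (hmem y).2 (Or.inl (List.mem_cons_self ..))
      have hyrs : ∀ z ∈ rs, y < z := fun z hz => (List.pairwise_cons.1 hR).1 z hz
      have hRtl : rs.Pairwise (· < ·) := (List.pairwise_cons.1 hR).2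
      have hynotrs : y ∉ rs := fun h => lt_irrefl y (hyrs y h)
      have hyx : y ≠ x := fun h => hxS (h ▸ hyS)
      by_cases hy1 : y = x - 1
      · -- A removes x - 1 from the set; B consumes the head of r
        subst hy1
        have hb : borrowStep (S, cnt) x = (PySem.Set.discard S (x - 1), cnt) := by
          simp [borrowStep, hyS, PySem.Set.remove?_of_mem hyS]
        rw [List.foldl_cons, hb, twoPointer, if_pos rfl]
        refine ihL rs _ D cnt hLtl hRtl (PySem.Set.nodup_discard S _ hS) ?_ ?_ ?_
        · intro v
          rw [PySem.Set.mem_discard, hmem v, List.mem_cons]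
          constructor
          · rintro ⟨(h | h) | h, hne⟩
            · exact absurd h hne
            · exact Or.inl h
            · exact Or.inr h
          · rintro (h | h)
            · exact ⟨Or.inl (Or.inr h), fun he => hynotrs (he ▸ h)⟩
            · refine ⟨Or.inr h, fun he => ?_⟩
              have := hD _ h x (List.mem_cons_self ..); omega
        · intro d hd z hz
          have h1 := hD d hd x (List.mem_cons_self ..)
          have := hxls z hz; omega
        · intro z hz h
          exact hxtl z hz ((PySem.Set.mem_discard S _ z).1 h).1
      · by_cases hy2 : y < x - 1
        · -- B discards a too-small reserve; A's set unchanged (it can never match a later, larger x)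
          rw [twoPointer, if_neg hy1, if_pos hy2]
          refine ihR S (y :: D) cnt hRtl hS ?_ ?_ hx hxS hxtl
          · intro v
            rw [hmem v, List.mem_cons, List.mem_cons]
            tauto
          · intro d hd z hz
            rcases List.mem_cons.1 hd with hd | hd
            · rcases List.mem_cons.1 hz with hz | hz
              · omega
              · have := hxls z hz; omega
            · exact hD d hd z hz
        · have hx1 : x - 1 ∉ S := by
            rw [hmem, List.mem_cons]
            rintro ((h | h) | h)
            · exact hy1 h.symm
            · have := hyrs _ h; omega
            · have := hD _ h x (List.mem_cons_self ..); omega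
          by_cases hy3 : y = x + 1
          · -- A removes x + 1; B consumes the head of r
            subst hy3
            have hb : borrowStep (S, cnt) x = (PySem.Set.discard S (x + 1), cnt) := by
              simp [borrowStep, hx1, hyS, PySem.Set.remove?_of_mem hyS]
            rw [List.foldl_cons, hb, twoPointer, if_neg hy1, if_neg hy2, if_pos rfl]
            refine ihL rs _ D cnt hLtl hRtl (PySem.Set.nodup_discard S _ hS) ?_ ?_ ?_
            · intro v
              rw [PySem.Set.mem_discard, hmem v, List.mem_cons]
              constructor
              · rintro ⟨(h | h) | h, hne⟩
                · exact absurd h hne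
                · exact Or.inl h
                · exact Or.inr h
              · rintro (h | h)
                · exact ⟨Or.inl (Or.inr h), fun he => hynotrs (he ▸ h)⟩
                · refine ⟨Or.inr h, fun he => ?_⟩
                  have := hD _ h x (List.mem_cons_self ..); omega
            · intro d hd z hz
              have h1 := hD d hd x (List.mem_cons_self ..)
              have := hxls z hz; omega
            · intro z hz h
              exact hxtl z hz ((PySem.Set.mem_discard S _ z).1 h).1
          · -- no neighbour available: both count a miss
            have hx2 : x + 1 ∉ S := by
              rw [hmem, List.mem_cons]
              rintro ((h | h) | h)
              · exact hy3 h.symm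
              · have := hyrs _ h; omega
              · have := hD _ h x (List.mem_cons_self ..); omega
            have hb : borrowStep (S, cnt) x = (S, cnt + 1) := by
              simp [borrowStep, hx1, hx2]
            rw [List.foldl_cons, hb, twoPointer, if_neg hy1, if_neg hy2, if_neg hy3]
            exact ihL (y :: rs) S D (cnt + 1) hLtl hR hS hmem
              (fun d hd z hz => hD d hd z (List.mem_cons_of_mem _ hz)) hxtl

-- a sorted deduplicated list is strictly increasing
theorem sorted_nodup_strict (xs : List Int) (h : xs.Nodup) :
    (PySem.List.sorted xs (fun x => x) false).Pairwise (· < ·) := by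
  have h1 := PySem.List.sorted_pairwise xs (fun x => x)
  have h2 : (PySem.List.sorted xs (fun x => x) false).Nodup :=
    ((PySem.List.sorted_perm xs (fun x => x) false).nodup_iff).2 h
  exact (h1.and h2).imp (fun hab => lt_of_le_of_ne hab.1 hab.2)

-- ===== VERDICT (by name: the statement is the Claim_ definition above) =====
theorem solution_spec : Claim_equal_solution := by
  unfold Claim_equal_solution
  intro n lost reserve _
  unfold Spec_solution solution solution_alt
  simp only []
  congr 1
  have hRnd : (PySem.Set.diff (PySem.Set.ofList reserve) (PySem.Set.ofList lost)).Nodup :=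
    PySem.Set.nodup_diff _ _ (PySem.Set.nodup_ofList _)
  have hLnd : (PySem.Set.diff (PySem.Set.ofList lost) (PySem.Set.ofList reserve)).Nodup :=
    PySem.Set.nodup_diff _ _ (PySem.Set.nodup_ofList _)
  refine main_inv _ _ _ [] 0 (sorted_nodup_strict _ hLnd) (sorted_nodup_strict _ hRnd) hRnd ?_ (by simp) ?_
  · intro v
    rw [PySem.List.mem_sorted]
    simp
  · intro z hz h
    rw [PySem.List.mem_sorted] at hz
    rw [PySem.Set.mem_diff] at hz h
    exact hz.2 ((PySem.Set.mem_ofList _ _).2 ((PySem.Set.mem_ofList _ _).1 h.1))
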